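-- pv_equiv track=rewrite | github.com/Reyhane14/website-fingerprinting | feature_generation/autoencoder/autoencoder.py | _get_cumulative_representation
-- ===== SOURCE A (Python) =====
-- def _get_cumulative_representation(trace, n):
--     """
--     Gets a cumulative representation of a trace, described in the "Website Fingerprinting at Internet Scale" paper.
--
--     @param n is the amount of features to be added.
--         It affects how often and the places where you sample
--
--     @return a fixed-length list of features (`len(features) == n`)
--     """
--     features = []
--
--     a, c = 0, 0
--
--     sample = (len(trace) // n)
--     sample = 1 if sample == 0 else sample
--     amount = 0
--
--     for i, packet in enumerate(trace):
--         c += packet[1]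
--         a += abs(packet[1])
--
--         if i % sample == 0:
--             amount += 1
--             features.append(c + a)
--
--             if amount == n:
--                 break
--
--     for i in range(amount, n):
--         features.append(0)
--
--     return features
-- ===== SOURCE B (Python) =====
-- def _get_cumulative_representation(trace, n):
--     sample = len(trace) // n
--     if sample == 0:
--         sample = 1
--     head = trace[:(n - 1) * sample + 1]
--     table = []
--     total = 0
--     for packet in head:
--         total += packet[1] + abs(packet[1])
--         table.append(total)
--     return [table[k * sample] if k * sample < len(table) else 0 for k in range(n)]
-- ===== Notes on version B (the rewrite author's own statement) =====
-- stated objective: alternative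
-- what changed: Replaced the interleaved scan (modulo test, break, trailing zero-pad loop) by a prefix-sum table built over exactly the prefix A would read, then a single indexed-sampling comprehension over range(n).
-- outside the precondition, e.g. on _get_cumulative_representation([(0, 3)], -1): A returns [6], B returns []
import Mathlib
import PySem

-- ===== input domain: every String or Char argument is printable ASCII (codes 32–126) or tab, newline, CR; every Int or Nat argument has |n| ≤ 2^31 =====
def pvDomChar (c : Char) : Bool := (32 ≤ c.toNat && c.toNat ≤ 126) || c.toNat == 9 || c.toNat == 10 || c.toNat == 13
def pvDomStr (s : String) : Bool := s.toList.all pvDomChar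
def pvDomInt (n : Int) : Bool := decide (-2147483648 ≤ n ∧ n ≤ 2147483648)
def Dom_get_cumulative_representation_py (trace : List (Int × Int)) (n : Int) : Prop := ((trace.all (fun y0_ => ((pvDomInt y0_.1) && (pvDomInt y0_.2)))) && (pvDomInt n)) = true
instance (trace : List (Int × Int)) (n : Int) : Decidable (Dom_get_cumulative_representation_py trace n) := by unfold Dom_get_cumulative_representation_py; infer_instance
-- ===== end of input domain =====

-- B replaces A's interleaved modulo/break scan by a prefix-sum table over the prefix A reads,
-- then indexed sampling over range(n) (objective: alternative decomposition, same cost).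

-- ===== PORT A =====
-- the enumerate loop of A, with its early break; returns (features, amount)
def pyA_loop (ps : List (Int × Int)) (i c a sample amount n : Int) (features : List Int) :
    List Int × Int :=
  match ps with
  | [] => (features, amount)
  | p :: rest =>
    let c := c + p.2
    let a := a + |p.2|
    if PySem.Int.mod i sample = 0 then
      let amount := amount + 1
      let features := features ++ [c + a]
      if amount = n then (features, amount)
      else pyA_loop rest (i + 1) c a sample amount n features
    else pyA_loop rest (i + 1) c a sample amount n features

def get_cumulative_representation_py (trace : List (Int × Int)) (n : Int) : List Int :=
  let sample := PySem.Int.floordiv (trace.length : Int) n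
  let sample := if sample = 0 then 1 else sample
  let r := pyA_loop trace 0 0 0 sample 0 n []
  (PySem.List.pyRange r.2 n 1).foldl (fun fs _ => fs ++ [0]) r.1

-- ===== PORT B =====
-- the table-building loop of Source B: total accumulates, each total is appended
def pyB_table (head : List (Int × Int)) : List Int :=
  (head.foldl (fun (acc : List Int × Int) p =>
      (acc.1 ++ [acc.2 + (p.2 + |p.2|)], acc.2 + (p.2 + |p.2|))) ([], 0)).1

def get_cumulative_representation_py_alt (trace : List (Int × Int)) (n : Int) : List Int :=
  let sample := PySem.Int.floordiv (trace.length : Int) n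
  let sample := if sample = 0 then 1 else sample
  let head := PySem.List.slice trace none (some ((n - 1) * sample + 1))
  let table := pyB_table head
  -- table[k*sample] under the guard k*sample < len(table): the index is in range, so pyGetD's
  -- default is never used
  (PySem.List.pyRange 0 n 1).map (fun k =>
    if k * sample < (table.length : Int) then PySem.List.pyGetD table (k * sample) 0 else 0)

-- ===== PRECONDITION & SPEC =====
-- Pre_ restricts to the natural domain n ≥ 1 (n is the number of features): at n = 0 A raises
-- ZeroDivisionError, and for n < 0 (a negative feature count, outside the natural domain) A's
-- nonempty return value is an accident of its modulo test with a negative sample.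
def Pre_get_cumulative_representation_py (trace : List (Int × Int)) (n : Int) : Prop := 1 ≤ n
instance (trace : List (Int × Int)) (n : Int) : Decidable (Pre_get_cumulative_representation_py trace n) := by unfold Pre_get_cumulative_representation_py; infer_instance

def pvWitness_get_cumulative_representation_py : (List (Int × Int)) × Int := ([(0, 1), (0, -2)], 2)

def Spec_get_cumulative_representation_py (trace : List (Int × Int)) (n : Int) (out : List Int) : Prop := out = get_cumulative_representation_py_alt trace n
instance (trace : List (Int × Int)) (n : Int) (out : List Int) : Decidable (Spec_get_cumulative_representation_py trace n out) := by unfold Spec_get_cumulative_representation_py; infer_instance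

-- ===== CLAIM (what is proved, stated in full; the proofs are below) =====
def Claim_equal_get_cumulative_representation_py : Prop := ∀ (trace : List (Int × Int)) (n : Int), Dom_get_cumulative_representation_py trace n → Pre_get_cumulative_representation_py trace n → Spec_get_cumulative_representation_py trace n (get_cumulative_representation_py trace n)

-- ===== LEMMAS AND PROOFS =====

-- per-packet contribution c + a accumulates
def stepv (p : Int × Int) : Int := p.2 + |p.2|

-- inclusive prefix sums starting from s
def psums (s : Int) : List Int → List Int
  | [] => []
  | x :: r => (s + x) :: psums (s + x) r

-- reference shape of A's append sequence: take one value, skip smp-1, repeat, at most m times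
def sampleRec (smp : Nat) : Int → List Int → Nat → List Int
  | _, _, 0 => []
  | _, [], _ + 1 => []
  | s, x :: r, m + 1 =>
    (s + x) :: sampleRec smp (s + x + (r.take (smp - 1)).sum) (r.drop (smp - 1)) m

lemma sum_map_split (l : List (Int × Int)) :
    (l.map (·.2)).sum + (l.map (fun p => |p.2|)).sum = (l.map stepv).sum := by
  induction l with
  | nil => simp
  | cons p r ih => simp [stepv] at *; linarith

-- A's loop ignores elements at non-multiple indices, only accumulating c and a
lemma pyA_skip (ps qs : List (Int × Int)) (i c a sample amount n : Int) (features : List Int)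
    (h : ∀ j : Nat, j < ps.length → PySem.Int.mod (i + j) sample ≠ 0) :
    pyA_loop (ps ++ qs) i c a sample amount n features
      = pyA_loop qs (i + ps.length) (c + (ps.map (·.2)).sum)
          (a + (ps.map (fun p => |p.2|)).sum) sample amount n features := by
  induction ps generalizing i c a with
  | nil => simp
  | cons p r ih =>
    have h0 := h 0 (by simp)
    simp only [List.cons_append, pyA_loop]
    rw [if_neg (by simpa using h0)]
    have hstep : ∀ j : Nat, j < r.length → PySem.Int.mod ((i + 1) + j) sample ≠ 0 := by
      intro j hj
      have hh := h (j + 1) (by simp; omega)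
      have e : (i + 1) + (j : Int) = i + ((j + 1 : Nat) : Int) := by push_cast; ring
      rw [e]; exact hh
    rw [ih (i + 1) (c + p.2) (a + |p.2|) hstep]
    have e1 : (i + 1) + (r.length : Int) = i + (((p :: r).length : Nat) : Int) := by
      push_cast [List.length_cons]; ring
    rw [e1]
    simp [add_assoc]

-- main characterisation of A's loop: starting at a multiple of sample with m appends left,
-- it appends exactly the sampleRec sequence and reports the new amount
lemma pyA_main (m : Nat) : ∀ (ps : List (Int × Int)) (i c a amount n sample : Int)
    (features : List Int), 1 ≤ sample → 0 ≤ i → sample ∣ i → n = amount + (m : Int) → 1 ≤ m →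
    pyA_loop ps i c a sample amount n features
      = (features ++ sampleRec sample.toNat (c + a) (ps.map stepv) m,
         amount + ((sampleRec sample.toNat (c + a) (ps.map stepv) m).length : Int)) := by
  induction m with
  | zero => intro ps i c a amount n sample fs _ _ _ _ hm; omega
  | succ m' ih =>
    intro ps i c a amount n sample fs hs hi hdvd hn _
    match ps with
    | [] => simp [pyA_loop, sampleRec]
    | p :: rest =>
      simp only [pyA_loop]
      rw [if_pos ((PySem.Int.mod_eq_zero_iff_dvd i sample).mpr hdvd)]
      have q := sample.toNat - 1
      by_cases hend : amount + 1 = n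
      · have hm0 : m' = 0 := by omega
        subst hm0
        rw [if_pos hend]
        simp only [List.map_cons, sampleRec, List.length_cons, List.length_nil]
        refine Prod.ext ?_ ?_
        · simp only [stepv]; ring_nf
        · simp
      · rw [if_neg hend]
        have hm' : 1 ≤ m' := by omega
        have hmodne : ∀ j : Nat, j < (rest.take (sample.toNat - 1)).length →
            PySem.Int.mod ((i + 1) + j) sample ≠ 0 := by
          intro j hj hmod
          have hjlt : (j : Int) < sample - 1 := by
            have := List.length_take_le (sample.toNat - 1) rest
            have h2 : j < sample.toNat - 1 := Nat.lt_of_lt_of_le hj this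
            omega
          have hdvd2 : sample ∣ (i + 1 + j) := (PySem.Int.mod_eq_zero_iff_dvd _ _).mp hmod
          have hdvd3 : sample ∣ (1 + j) := by
            have := Int.dvd_sub hdvd2 hdvd
            simpa [add_assoc, add_comm, add_left_comm] using this
          have hpos : (0 : Int) < 1 + j := by positivity
          have := Int.le_of_dvd hpos hdvd3
          omega
        conv_lhs => rw [show rest = rest.take (sample.toNat - 1) ++ rest.drop (sample.toNat - 1)
          from (List.take_append_drop _ _).symm]
        rw [pyA_skip _ _ _ _ _ _ _ _ _ hmodne]
        by_cases hlen : sample.toNat - 1 ≤ rest.length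
        · -- a full block was skipped; recurse at i + sample
          have hqlen : (rest.take (sample.toNat - 1)).length = sample.toNat - 1 := by
            simp [List.length_take, hlen]
          have hi' : (i + 1) + ((rest.take (sample.toNat - 1)).length : Int) = i + sample := by
            rw [hqlen]; omega
          rw [hi', ih _ (i + sample) _ _ (amount + 1) n sample _ hs (by omega)
            (by exact Dvd.dvd.add hdvd (dvd_refl sample)) (by push_cast at hn ⊢; omega) hm']
          simp only [List.map_cons, sampleRec, List.length_cons]
          have hsv : (c + p.2 + (List.map (fun x => x.2) (rest.take (sample.toNat - 1))).sum) +
              (a + |p.2| + (List.map (fun p => |p.2|) (rest.take (sample.toNat - 1))).sum)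
              = c + a + stepv p + ((List.map stepv rest).take (sample.toNat - 1)).sum := by
            rw [← List.map_take, ← sum_map_split (rest.take (sample.toNat - 1))]
            simp [stepv]; ring
          rw [hsv, ← List.map_drop]
          refine Prod.ext ?_ ?_
          · simp [stepv, List.append_assoc]; ring_nf
          · push_cast; ring
        · -- the trace ends inside the skipped block
          have hdrop : rest.drop (sample.toNat - 1) = [] := List.drop_eq_nil_of_le (by omega)
          rw [hdrop]
          simp only [pyA_loop, List.map_cons, sampleRec]
          rw [← List.map_drop, hdrop]
          obtain ⟨m'', rfl⟩ : ∃ k, m' = k + 1 := ⟨m' - 1, by omega⟩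
          simp only [sampleRec, List.map_nil]
          refine Prod.ext ?_ ?_
          · simp [stepv]; ring_nf
          · simp

lemma sampleRec_pad (smp : Nat) (hs : 1 ≤ smp) :
    ∀ (m : Nat) (xs : List Int) (s : Int),
    sampleRec smp s xs m ++ List.replicate (m - (sampleRec smp s xs m).length) 0
      = (List.range m).map (fun k =>
          if k * smp < xs.length then s + (xs.take (k * smp + 1)).sum else 0) := by
  intro m
  induction m with
  | zero => intro xs s; simp [sampleRec]
  | succ m' ih =>
    intro xs s
    match xs with
    | [] =>
      rw [List.map_congr_left (g := fun _ => (0 : Int)) (by intro k _; simp)]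
      simp [sampleRec, List.map_const']
    | x :: r =>
      rw [List.range_succ_eq_map]
      simp only [sampleRec, List.map_cons, List.length_cons, List.map_map, List.cons_append]
      congr 1
      · simp
      · rw [show (m' + 1) -
            (sampleRec smp (s + x + (r.take (smp - 1)).sum) (r.drop (smp - 1)) m').length.succ
            = m' - (sampleRec smp (s + x + (r.take (smp - 1)).sum) (r.drop (smp - 1)) m').length
          from by omega]
        rw [ih (r.drop (smp - 1)) (s + x + (r.take (smp - 1)).sum)]
        refine List.map_congr_left ?_
        intro k _
        have hmul : k.succ * smp = k * smp + smp := Nat.succ_mul k smp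
        have hdl : (r.drop (smp - 1)).length = r.length - (smp - 1) := List.length_drop
        by_cases hg : k * smp < (r.drop (smp - 1)).length
        · rw [if_pos hg, Function.comp_apply, if_pos (by omega)]
          have htk : r.take (k.succ * smp)
              = r.take (smp - 1) ++ (r.drop (smp - 1)).take (k * smp + 1) := by
            rw [← List.take_add]
            congr 1
            omega
          simp only [List.take_succ_cons, List.sum_cons, htk, List.sum_append]
          ring
        · rw [if_neg hg, Function.comp_apply, if_neg (by omega)]

lemma pyB_fold (head : List (Int × Int)) : ∀ (fs : List Int) (s : Int),
    head.foldl (fun (acc : List Int × Int) p =>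
      (acc.1 ++ [acc.2 + (p.2 + |p.2|)], acc.2 + (p.2 + |p.2|))) (fs, s)
      = (fs ++ psums s (head.map stepv), s + (head.map stepv).sum) := by
  induction head with
  | nil => simp [psums]
  | cons p r ih =>
    intro fs s
    simp only [List.foldl_cons, List.map_cons, psums, List.sum_cons]
    rw [ih]
    refine Prod.ext ?_ ?_
    · simp [stepv, List.append_assoc]
    · simp [stepv]; ring

lemma psums_length (s : Int) (xs : List Int) : (psums s xs).length = xs.length := by
  induction xs generalizing s with
  | nil => rfl
  | cons x r ih => simp [psums, ih]

lemma psums_getElem? (xs : List Int) : ∀ (s : Int) (m : Nat), m < xs.length →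
    (psums s xs)[m]? = some (s + (xs.take (m + 1)).sum) := by
  induction xs with
  | nil => intro s m h; simp at h
  | cons x r ih =>
    intro s m h
    cases m with
    | zero => simp [psums]
    | succ m' =>
      simp only [psums, List.getElem?_cons_succ]
      rw [ih (s + x) m' (by simpa using h)]
      simp [List.take_succ_cons]
      ring

lemma psums_getD (xs : List Int) (s : Int) (m : Nat) (h : m < xs.length) :
    (psums s xs).getD m 0 = s + (xs.take (m + 1)).sum := by
  rw [List.getD_eq_getElem?_getD, psums_getElem? xs s m h]
  rfl

lemma sampleRec_length_le (smp : Nat) : ∀ (m : Nat) (xs : List Int) (s : Int),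
    (sampleRec smp s xs m).length ≤ m := by
  intro m
  induction m with
  | zero => intro xs s; simp [sampleRec]
  | succ m' ih =>
    intro xs s
    match xs with
    | [] => simp [sampleRec]
    | x :: r =>
      simp only [sampleRec, List.length_cons]
      exact Nat.succ_le_succ (ih _ _)

-- ===== VERDICT (by name: the statement is the Claim_ definition above) =====
theorem get_cumulative_representation_py_spec : Claim_equal_get_cumulative_representation_py := by
  intro trace n _ hpre
  have hn : (1 : Int) ≤ n := hpre
  show get_cumulative_representation_py trace n = get_cumulative_representation_py_alt trace n
  simp only [get_cumulative_representation_py, get_cumulative_representation_py_alt]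
  have h0 : 0 ≤ PySem.Int.floordiv (trace.length : Int) n :=
    (PySem.Int.le_floordiv_iff_mul_le (a := (trace.length : Int)) (b := n) (q := 0)
      (by omega)).mpr (by simp)
  set S : Int := if PySem.Int.floordiv (trace.length : Int) n = 0 then 1
    else PySem.Int.floordiv (trace.length : Int) n with hSdef
  have hS : 1 ≤ S := by
    rw [hSdef]; split_ifs with h <;> omega
  have hScast : ((S.toNat : Nat) : Int) = S := Int.toNat_of_nonneg (by omega)
  have hsmp1 : 1 ≤ S.toNat := by omega
  set N : Nat := n.toNat with hNdef
  have hNcast : ((N : Nat) : Int) = n := Int.toNat_of_nonneg (by omega)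
  have hN1 : 1 ≤ N := by omega
  -- A side: characterise the loop, turn the padding fold into replicate, close with sampleRec_pad
  rw [pyA_main N trace 0 0 0 0 n S [] hS le_rfl (dvd_zero S) (by omega) hN1]
  rw [PySem.List.foldl_append_singleton_eq_map]
  rw [List.map_congr_left (g := fun _ => (0 : Int)) (fun _ _ => rfl)]
  rw [List.map_const', PySem.List.length_pyRange_one]
  simp only [List.nil_append, zero_add]
  have hlenle : (sampleRec S.toNat (0 : Int) (trace.map stepv) N).length ≤ N :=
    sampleRec_length_le S.toNat N (trace.map stepv) 0
  rw [show (n - ((sampleRec S.toNat (0 : Int) (trace.map stepv) N).length : Int)).toNat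
      = N - (sampleRec S.toNat (0 : Int) (trace.map stepv) N).length from by omega]
  rw [sampleRec_pad S.toNat hsmp1 N (trace.map stepv) 0]
  -- B side: slice is take, the fold is psums, the comprehension samples it
  have hT0 : (0 : Int) ≤ (n - 1) * S + 1 := by
    have := mul_nonneg (by omega : (0 : Int) ≤ n - 1) (by omega : (0 : Int) ≤ S)
    omega
  rw [PySem.List.slice_to _ hT0]
  set T : Nat := ((n - 1) * S + 1).toNat with hTdef
  have hTcast : ((((N - 1) * S.toNat + 1 : Nat)) : Int) = (n - 1) * S + 1 := by
    push_cast [Nat.cast_sub hN1]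
    rw [hScast, hNcast]
  have hTeq : T = (N - 1) * S.toNat + 1 := by
    rw [hTdef, ← hTcast, Int.toNat_natCast]
  have htab : pyB_table (trace.take T) = psums 0 ((trace.take T).map stepv) := by
    unfold pyB_table
    rw [pyB_fold]
    simp
  rw [htab]
  rw [PySem.List.pyRange_one 0 n]
  rw [List.map_map]
  rw [show (n - 0).toNat = N from by omega]
  refine List.map_congr_left ?_
  intro k hk
  have hkN : k < N := List.mem_range.mp hk
  simp only [Function.comp_apply, zero_add]
  have hks : ((k : Int)) * S = (((k * S.toNat : Nat)) : Int) := by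
    push_cast
    rw [hScast]
  rw [hks, PySem.List.pyGetD_natCast]
  have hplen : (psums (0 : Int) ((trace.take T).map stepv)).length = min T trace.length := by
    rw [psums_length]
    simp [List.length_take]
  have hkT : k * S.toNat < T := by
    have hle : k * S.toNat ≤ (N - 1) * S.toNat :=
      Nat.mul_le_mul_right S.toNat (by omega)
    omega
  have hmaplen : ((trace.take T).map stepv).length = min T trace.length := by
    simp [List.length_take]
  by_cases hg : k * S.toNat < trace.length
  · rw [if_pos (by simpa using hg),
      if_pos (by rw [hplen]; exact_mod_cast (by omega : k * S.toNat < min T trace.length))]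
    rw [psums_getD _ _ _ (by rw [hmaplen]; omega)]
    rw [List.map_take, List.take_take, min_eq_left (by omega)]
    exact (zero_add _).symm
  · rw [if_neg (by simpa using hg), if_neg (by rw [hplen]; exact_mod_cast (by omega))]
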